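-- pv_equiv track=rewrite | github.com/kzlbj/sec-extractor | extraction/classifiers/table_classifier.py | _match_balance_sheet_pattern
-- ===== SOURCE A (Python) =====
-- def _match_balance_sheet_pattern(table):
--     """匹配资产负债表模式"""
--     if 'table_data' not in table or 'rows' not in table['table_data']:
--         return False
--
--     # 资产负债表通常有资产=负债+权益的特点
--     rows_text = ' '.join(str(row[0]) for row in table['table_data']['rows'] if row and len(row) > 0)
--     rows_text = rows_text.lower()
--
--     # 检查是否包含资产和负债
--     has_assets = any(keyword in rows_text for keyword in ['assets', 'asset', '资产'])
--     has_liabilities = any(keyword in rows_text for keyword in ['liabilities', 'liability', '负债'])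
--
--     return has_assets and has_liabilities
-- ===== SOURCE B (Python) =====
-- def _match_balance_sheet_pattern(table):
--     """Single pass over the rows, no joined string: check each row's first
--     cell directly and stop as soon as both keyword groups were seen."""
--     if 'table_data' not in table or 'rows' not in table['table_data']:
--         return False
--     has_assets = False
--     has_liabilities = False
--     for row in table['table_data']['rows']:
--         if not row:
--             continue
--         text = str(row[0]).lower()
--         if not has_assets:
--             has_assets = any(k in text for k in ('assets', 'asset', '资产'))
--         if not has_liabilities:
--             has_liabilities = any(k in text for k in ('liabilities', 'liability', '负债'))
--         if has_assets and has_liabilities: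
--             return True
--     return False
-- ===== Notes on version B (the rewrite author's own statement) =====
-- stated objective: alternative
-- what changed: Instead of joining every first cell into one big lowered string and scanning it six times, B makes a single pass over the rows, tests the keyword groups against each row's own lowered first cell, and returns early once both groups have been seen.
import Mathlib
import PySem

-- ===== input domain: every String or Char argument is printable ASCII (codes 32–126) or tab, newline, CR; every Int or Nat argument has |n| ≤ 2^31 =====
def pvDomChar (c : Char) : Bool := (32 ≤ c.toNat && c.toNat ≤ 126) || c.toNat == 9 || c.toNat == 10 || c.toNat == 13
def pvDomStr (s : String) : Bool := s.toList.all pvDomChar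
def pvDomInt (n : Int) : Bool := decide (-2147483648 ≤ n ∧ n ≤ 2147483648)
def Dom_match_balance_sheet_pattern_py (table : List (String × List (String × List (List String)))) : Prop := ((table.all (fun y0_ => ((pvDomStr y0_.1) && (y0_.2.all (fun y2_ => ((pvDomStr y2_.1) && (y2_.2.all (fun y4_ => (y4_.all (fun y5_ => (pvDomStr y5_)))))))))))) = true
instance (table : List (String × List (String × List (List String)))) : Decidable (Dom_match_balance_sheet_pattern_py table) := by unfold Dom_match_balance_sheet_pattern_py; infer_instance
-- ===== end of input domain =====

-- B replaces A's join-everything-then-scan with a single pass over the rows that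
-- checks each first cell directly and stops once both keyword groups were seen
-- (a different decomposition; same return value on every input).

-- ===== PORT A =====
-- literal transliteration of _match_balance_sheet_pattern: build the joined,
-- lowered text of all first cells, then run the two any() keyword scans on it.
def match_balance_sheet_pattern_py (table : List (String × List (String × List (List String)))) : Bool :=
  let d := PySem.Dict.mk table
  if !(d.contains "table_data") then false
  else
    let td := PySem.Dict.mk (d.getD "table_data" [])
    if !(td.contains "rows") then false
    else
      let rows := td.getD "rows" []
      -- ' '.join(str(row[0]) for row in rows if row and len(row) > 0); row[0] on a
      -- guarded-nonempty row is headD, str() on a str is the identity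
      let rows_text := PySem.Str.join " "
        ((rows.filter (fun row => !row.isEmpty && decide (0 < row.length))).map (fun row => row.headD ""))
      let rows_text := PySem.Str.lower rows_text
      let has_assets := (["assets", "asset", "资产"] : List String).any (fun kw => PySem.Str.isIn kw rows_text)
      let has_liabilities := (["liabilities", "liability", "负债"] : List String).any (fun kw => PySem.Str.isIn kw rows_text)
      has_assets && has_liabilities

-- ===== PORT B =====
-- the for-loop of Source B: state (has_assets, has_liabilities), `continue` on empty
-- rows, early `return True` once both flags hold, `return False` after the loop
def pvAltLoop : List (List String) → Bool → Bool → Bool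
  | [], _, _ => false
  | row :: rest, ha, hl =>
    if row.isEmpty then pvAltLoop rest ha hl
    else
      let text := PySem.Str.lower (row.headD "")
      let ha' := if ha then ha else (["assets", "asset", "资产"] : List String).any (fun k => PySem.Str.isIn k text)
      let hl' := if hl then hl else (["liabilities", "liability", "负债"] : List String).any (fun k => PySem.Str.isIn k text)
      if ha' && hl' then true else pvAltLoop rest ha' hl'

def match_balance_sheet_pattern_py_alt (table : List (String × List (String × List (List String)))) : Bool :=
  let d := PySem.Dict.mk table
  if !(d.contains "table_data") then false
  else
    let td := PySem.Dict.mk (d.getD "table_data" [])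
    if !(td.contains "rows") then false
    else pvAltLoop (td.getD "rows" []) false false

-- ===== PRECONDITION & SPEC =====
def Spec_match_balance_sheet_pattern_py (table : List (String × List (String × List (List String)))) (out : Bool) : Prop := out = match_balance_sheet_pattern_py_alt table
instance (table : List (String × List (String × List (List String)))) (out : Bool) : Decidable (Spec_match_balance_sheet_pattern_py table out) := by unfold Spec_match_balance_sheet_pattern_py; infer_instance

-- ===== CLAIM (what is proved, stated in full; the proofs are below) =====
def Claim_equal_match_balance_sheet_pattern_py : Prop := ∀ (table : List (String × List (String × List (List String)))), Dom_match_balance_sheet_pattern_py table → Spec_match_balance_sheet_pattern_py table (match_balance_sheet_pattern_py table)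

-- ===== LEMMAS AND PROOFS =====

-- a keyword that does not contain c and is a prefix of a ++ c :: b is a prefix of a
theorem pv_prefix_of_append_cons {c : Char} : ∀ {kw a b : List Char}, c ∉ kw →
    kw <+: a ++ c :: b → kw <+: a := by
  intro kw
  induction kw with
  | nil => intro a b _ _; exact List.nil_prefix
  | cons k kw' ih =>
    intro a b hc h
    cases a with
    | nil =>
      rw [List.nil_append, List.cons_prefix_cons] at h
      exact absurd (h.1 ▸ List.mem_cons_self) hc
    | cons x a' =>
      rw [List.cons_append, List.cons_prefix_cons] at h
      exact (List.cons_prefix_cons).mpr ⟨h.1, ih (fun hm => hc (List.mem_cons_of_mem _ hm)) h.2⟩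

-- an infix without c of a ++ c :: b lies wholly inside a or wholly inside b
theorem pv_infix_append_cons_iff {kw : List Char} {c : Char} (hne : kw ≠ []) (hc : c ∉ kw) :
    ∀ {a b : List Char}, (kw <:+: a ++ c :: b ↔ kw <:+: a ∨ kw <:+: b) := by
  intro a b
  constructor
  · intro h
    induction a with
    | nil =>
      rw [List.nil_append, List.infix_cons_iff] at h
      rcases h with hp | h
      · cases kw with
        | nil => exact absurd rfl hne
        | cons k kw' =>
          rw [List.cons_prefix_cons] at hp
          exact absurd (hp.1 ▸ List.mem_cons_self) hc
      · exact Or.inr h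
    | cons x a' ih =>
      rw [List.cons_append, List.infix_cons_iff] at h
      rcases h with hp | h
      · have hp' : kw <+: (x :: a') ++ c :: b := by simpa using hp
        exact Or.inl (pv_prefix_of_append_cons hc hp').isInfix
      · rcases ih h with h' | h'
        · exact Or.inl (h'.trans (List.suffix_cons x a').isInfix)
        · exact Or.inr h'
  · rintro (h | h)
    · exact h.trans ⟨[], c :: b, by simp⟩
    · exact h.trans ⟨a ++ [c], [], by simp⟩

-- 'kw in join(" ", parts)' = any row contains kw, for kw nonempty and space-free
theorem pv_isIn_join (kw : List Char) (hne : kw ≠ []) (hc : ' ' ∉ kw) :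
    ∀ parts : List (List Char),
      PySem.Chars.isIn kw (PySem.Chars.join [' '] parts) = parts.any (fun p => PySem.Chars.isIn kw p) := by
  intro parts
  induction parts with
  | nil =>
    rw [PySem.Chars.join_nil, List.any_nil]
    rw [PySem.Chars.isIn_eq_false_iff]
    intro hinf
    exact hne (List.eq_nil_of_infix_nil hinf)
  | cons p rest ih =>
    cases rest with
    | nil => rw [PySem.Chars.join_singleton]; simp
    | cons q rest' =>
      rw [PySem.Chars.join_cons_cons, List.any_cons]
      have hsplit : p ++ [' '] ++ PySem.Chars.join [' '] (q :: rest')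
          = p ++ ' ' :: PySem.Chars.join [' '] (q :: rest') := by simp
      rw [hsplit]
      rcases hA : PySem.Chars.isIn kw (p ++ ' ' :: PySem.Chars.join [' '] (q :: rest')) with _ | _
      · rw [PySem.Chars.isIn_eq_false_iff, pv_infix_append_cons_iff hne hc] at hA
        rw [not_or] at hA
        rw [← ih]
        symm
        simp only [Bool.or_eq_false_iff]
        exact ⟨(PySem.Chars.isIn_eq_false_iff _ _).mpr hA.1, (PySem.Chars.isIn_eq_false_iff _ _).mpr hA.2⟩
      · rw [PySem.Chars.isIn_iff_infix, pv_infix_append_cons_iff hne hc] at hA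
        symm
        rw [← ih]
        rcases hA with h | h
        · simp [(PySem.Chars.isIn_iff_infix _ _).mpr h]
        · simp [(PySem.Chars.isIn_iff_infix _ _).mpr h]

-- lowercasing commutes with the space join (lowerChar ' ' = ' ')
theorem pv_lower_join : ∀ parts : List (List Char),
    PySem.Chars.lower (PySem.Chars.join [' '] parts) = PySem.Chars.join [' '] (parts.map PySem.Chars.lower) := by
  intro parts
  induction parts with
  | nil => simp [PySem.Chars.join_nil, PySem.Chars.lower]
  | cons p rest ih =>
    cases rest with
    | nil => simp [PySem.Chars.join_singleton]
    | cons q rest' =>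
      have hR : PySem.Chars.join [' '] (PySem.Chars.lower p :: List.map PySem.Chars.lower (q :: rest'))
          = PySem.Chars.lower p ++ [' '] ++ PySem.Chars.join [' '] (List.map PySem.Chars.lower (q :: rest')) := by
        rw [List.map_cons, PySem.Chars.join_cons_cons, ← List.map_cons]
      rw [List.map_cons, hR, PySem.Chars.join_cons_cons, ← ih]
      simp [PySem.Chars.lower, (by decide : PySem.Chars.lowerChar ' ' = ' ')]

-- string-level form: kw in lower(join(" ", parts)) = some part (lowered) contains kw
theorem pv_isIn_lower_join (kw : String) (hne : kw.toList ≠ []) (hc : ' ' ∉ kw.toList)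
    (parts : List String) :
    PySem.Str.isIn kw (PySem.Str.lower (PySem.Str.join " " parts))
      = parts.any (fun p => PySem.Str.isIn kw (PySem.Str.lower p)) := by
  rw [PySem.Str.isIn_eq, PySem.Str.toList_lower, PySem.Str.toList_join]
  have hsp : (" " : String).toList = [' '] := rfl
  rw [hsp, pv_lower_join, pv_isIn_join kw.toList hne hc]
  rw [List.map_map, List.any_map]
  congr 1
  funext p
  simp [PySem.Str.isIn_eq, PySem.Str.toList_lower]

-- A's filter+map over rows, folded into one rows.any
theorem pv_any_parts (g : String → Bool) : ∀ rows : List (List String),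
    (((rows.filter (fun row => !row.isEmpty && decide (0 < row.length))).map (fun row => row.headD "")).any g)
      = rows.any (fun row => !row.isEmpty && g (row.headD "")) := by
  intro rows
  have hfix : (fun row : List String => !row.isEmpty && decide (0 < row.length))
      = (fun row : List String => !row.isEmpty) := by
    funext a; cases a <;> simp
  rw [hfix]
  induction rows with
  | nil => rfl
  | cons row rest ih =>
    by_cases h : row.isEmpty
    · simp [h]
    · simp [h]

-- the loop of B, characterized: starting flags or-ed with what the rows contain
theorem pv_loop_eq (fA fL : List String → Bool)
    (hA : ∀ row, fA row = (!row.isEmpty && (["assets", "asset", "资产"] : List String).any (fun k => PySem.Str.isIn k (PySem.Str.lower (row.headD "")))))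
    (hL : ∀ row, fL row = (!row.isEmpty && (["liabilities", "liability", "负债"] : List String).any (fun k => PySem.Str.isIn k (PySem.Str.lower (row.headD ""))))) :
    ∀ rows (ha hl : Bool), (ha && hl) = false →
      pvAltLoop rows ha hl = ((ha || rows.any fA) && (hl || rows.any fL)) := by
  intro rows
  induction rows with
  | nil => intro ha hl h; simp [pvAltLoop, h]
  | cons row rest ih =>
    intro ha hl h
    by_cases he : row.isEmpty
    · have he' : row.isEmpty = true := he
      rw [List.any_cons, List.any_cons, hA row, hL row, he']
      simp only [Bool.not_true, Bool.false_and, Bool.false_or]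
      rw [← ih ha hl h]
      simp [pvAltLoop, he']
    · have he' : row.isEmpty = false := by simpa using he
      rw [List.any_cons, List.any_cons, hA row, hL row, he']
      simp only [pvAltLoop, he', Bool.not_false, Bool.true_and, Bool.false_eq_true, if_false]
      generalize ((["assets", "asset", "资产"] : List String).any
          (fun k => PySem.Str.isIn k (PySem.Str.lower (row.headD "")))) = cA
      generalize ((["liabilities", "liability", "负债"] : List String).any
          (fun k => PySem.Str.isIn k (PySem.Str.lower (row.headD "")))) = cL
      cases ha <;> cases hl <;> cases cA <;> cases cL <;>
        simp [ih true false rfl, ih false true rfl, ih false false rfl]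

-- any over rows of a 3-way disjunction, split into three anys
theorem pv_any_or3 (l : List (List String)) (g1 g2 g3 : List String → Bool) :
    (l.any fun r => !r.isEmpty && (g1 r || (g2 r || g3 r)))
      = ((l.any fun r => !r.isEmpty && g1 r) || ((l.any fun r => !r.isEmpty && g2 r) || (l.any fun r => !r.isEmpty && g3 r))) := by
  induction l with
  | nil => rfl
  | cons r rest ih =>
    simp only [List.any_cons, ih]
    cases r.isEmpty <;> cases g1 r <;> cases g2 r <;> cases g3 r <;> simp

-- ===== VERDICT (by name: the statement is the Claim_ definition above) =====
theorem match_balance_sheet_pattern_py_spec : Claim_equal_match_balance_sheet_pattern_py := by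
  intro table _
  unfold Spec_match_balance_sheet_pattern_py match_balance_sheet_pattern_py match_balance_sheet_pattern_py_alt
  by_cases h1 : (PySem.Dict.mk table).contains "table_data"
  · simp only [h1, Bool.not_true, if_false, Bool.false_eq_true]
    by_cases h2 : (PySem.Dict.mk ((PySem.Dict.mk table).getD "table_data" [])).contains "rows"
    · simp only [h2, Bool.not_true, if_false, Bool.false_eq_true]
      set rows := (PySem.Dict.mk ((PySem.Dict.mk table).getD "table_data" [])).getD "rows" [] with hrows
      -- rewrite each of the six keyword tests from the joined text to a per-row any
      have step : ∀ kw : String, kw.toList ≠ [] → ' ' ∉ kw.toList →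
          PySem.Str.isIn kw (PySem.Str.lower (PySem.Str.join " "
            ((rows.filter (fun row => !row.isEmpty && decide (0 < row.length))).map (fun row => row.headD ""))))
          = rows.any (fun row => !row.isEmpty && PySem.Str.isIn kw (PySem.Str.lower (row.headD ""))) := by
        intro kw hne hc
        rw [pv_isIn_lower_join kw hne hc, pv_any_parts]
      simp only [List.any_cons, List.any_nil, Bool.or_false]
      rw [step "assets" (by decide) (by decide), step "asset" (by decide) (by decide),
          step "资产" (by decide) (by decide), step "liabilities" (by decide) (by decide),
          step "liability" (by decide) (by decide), step "负债" (by decide) (by decide)]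
      rw [pv_loop_eq
            (fun row => !row.isEmpty && (["assets", "asset", "资产"] : List String).any (fun k => PySem.Str.isIn k (PySem.Str.lower (row.headD ""))))
            (fun row => !row.isEmpty && (["liabilities", "liability", "负债"] : List String).any (fun k => PySem.Str.isIn k (PySem.Str.lower (row.headD ""))))
            (fun _ => rfl) (fun _ => rfl) rows false false rfl]
      simp only [Bool.false_or, List.any_cons, List.any_nil, Bool.or_false]
      rw [pv_any_or3, pv_any_or3]
    · simp [h2]
  · simp [h1]
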